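-- pv_equiv track=rewrite | github.com/HenrikLovold/Yatzy-Contest | game.py | four_eq
-- ===== SOURCE A (Python) =====
-- def four_eq(dice):
--     """
--     Internal method evaluating dices for four equal
--
--     :param dice: the dices to be evaluated
--     """
--     for i in range(len(dice)):
--         cnt = 0
--         for j in range(len(dice)):
--             if i != j and dice[i] == dice[j]:
--                 cnt += 1
--         if cnt == 3:
--             return dice[i] * 3
--     return 0
-- ===== SOURCE B (Python) =====
-- def four_eq(dice):
--     counts = {}
--     for d in dice:
--         counts[d] = counts.get(d, 0) + 1
--     for value, cnt in counts.items():
--         if cnt == 4: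
--             return value * 3
--     return 0
-- ===== Notes on version B (the rewrite author's own statement) =====
-- stated objective: faster
-- what changed: Replaces the O(n^2) per-element rescan with a single frequency dict built in one pass, then a scan of the dict in first-appearance order for the value whose count is exactly 4 (returning value*3, reproducing A's scoring quirk).
import Mathlib
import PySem

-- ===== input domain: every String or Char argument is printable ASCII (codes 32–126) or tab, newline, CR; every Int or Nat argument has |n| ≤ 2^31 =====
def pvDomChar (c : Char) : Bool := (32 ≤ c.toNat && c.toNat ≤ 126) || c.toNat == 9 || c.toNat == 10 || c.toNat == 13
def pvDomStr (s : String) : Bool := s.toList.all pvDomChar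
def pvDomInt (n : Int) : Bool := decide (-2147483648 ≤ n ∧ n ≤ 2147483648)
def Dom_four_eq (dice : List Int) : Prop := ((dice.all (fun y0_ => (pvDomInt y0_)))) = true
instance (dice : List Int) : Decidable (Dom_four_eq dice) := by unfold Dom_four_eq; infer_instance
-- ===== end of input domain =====

-- B replaces A's nested per-element rescans by a one-pass frequency dict scanned for count == 4 (simpler).

-- ===== PORT A =====
-- inner loop: cnt = number of j ≠ i with dice[i] == dice[j]
def fourEqCnt (dice : List Int) (i : Nat) : Int :=
  (List.range dice.length).foldl
    (fun cnt j => if i ≠ j ∧ dice.getD i 0 = dice.getD j 0 then cnt + 1 else cnt) 0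

-- outer loop over i in range(len(dice)) with early return
def fourEqGo (dice : List Int) : List Nat → Int
  | [] => 0
  | i :: rest => if fourEqCnt dice i = 3 then dice.getD i 0 * 3 else fourEqGo dice rest

def four_eq (dice : List Int) : Int :=
  fourEqGo dice (List.range dice.length)

-- ===== PORT B =====
-- scan of counts.items() for the first count == 4
def fourEqScan : List (Int × Int) → Int
  | [] => 0
  | (v, c) :: rest => if c = 4 then v * 3 else fourEqScan rest

def four_eq_alt (dice : List Int) : Int :=
  fourEqScan ((dice.foldl (fun d x => d.insert x (d.getD x 0 + 1)) PySem.Dict.empty).items)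

-- ===== PRECONDITION & SPEC =====
def Spec_four_eq (dice : List Int) (out : Int) : Prop := out = four_eq_alt dice
instance (dice : List Int) (out : Int) : Decidable (Spec_four_eq dice out) := by unfold Spec_four_eq; infer_instance

-- ===== CLAIM (what is proved, stated in full; the proofs are below) =====
def Claim_equal_four_eq : Prop := ∀ (dice : List Int), Dom_four_eq dice → Spec_four_eq dice (four_eq dice)

-- ===== LEMMAS AND PROOFS =====

-- common reference scan: first value of l whose multiplicity in dice is 4, times 3
def findVal (dice : List Int) : List Int → Int
  | [] => 0
  | x :: rest => if dice.count x = 4 then x * 3 else findVal dice rest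

lemma countP_pair_split (i : Nat) (P : Nat → Prop) [DecidablePred P] (l : List Nat) :
    l.countP (fun j => decide (i ≠ j ∧ P j)) + l.countP (fun j => decide (i = j ∧ P j))
      = l.countP (fun j => decide (P j)) := by
  induction l with
  | nil => simp
  | cons x t ih =>
    rw [List.countP_cons, List.countP_cons, List.countP_cons, ← ih]
    split_ifs <;> simp_all <;> omega

lemma countP_single (i : Nat) (P : Nat → Prop) [DecidablePred P] (l : List Nat) :
    l.countP (fun j => decide (i = j ∧ P j)) = if P i then l.count i else 0 := by
  induction l with
  | nil => simp
  | cons x t ih =>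
    rw [List.countP_cons, List.count_cons, ih]
    split_ifs <;> simp_all

lemma map_getD_range (dice : List Int) :
    (List.range dice.length).map (fun j => dice.getD j 0) = dice := by
  apply List.ext_getElem
  · simp
  · intro i h1 h2
    simp [List.getD_eq_getElem?_getD, List.getElem?_eq_getElem h2]

lemma countP_range_getD (dice : List Int) (v : Int) :
    (List.range dice.length).countP (fun j => decide (v = dice.getD j 0)) = dice.count v := by
  rw [show (fun j => decide (v = dice.getD j 0))
      = ((fun y => decide (v = y)) ∘ fun j => dice.getD j 0) from rfl]
  rw [← List.countP_map, map_getD_range]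
  rw [List.count_eq_countP]
  apply List.countP_congr
  intro x _
  simp only [beq_iff_eq, decide_eq_true_eq]
  exact eq_comm

lemma cnt_eq (dice : List Int) (i : Nat) (h : i < dice.length) :
    fourEqCnt dice i = (dice.count (dice.getD i 0) : Int) - 1 := by
  unfold fourEqCnt
  rw [PySem.List.foldl_ite_add_one]
  have hsplit := countP_pair_split i (fun j => dice.getD i 0 = dice.getD j 0) (List.range dice.length)
  have hsingle := countP_single i (fun j => dice.getD i 0 = dice.getD j 0) (List.range dice.length)
  have hcnt := countP_range_getD dice (dice.getD i 0)
  have hci : (List.range dice.length).count i = 1 := by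
    rw [List.count_range]
    simp [h]
  rw [hsingle, if_pos rfl, hci, hcnt] at hsplit
  omega

lemma drop_cons_of_lt (dice : List Int) (a : Nat) (h : a < dice.length) :
    dice.drop a = dice.getD a 0 :: dice.drop (a + 1) := by
  rw [List.getD_eq_getElem?_getD, List.getElem?_eq_getElem h]
  exact List.drop_eq_getElem_cons h

lemma go_eq (dice : List Int) :
    ∀ (k a : Nat), a + k = dice.length →
      fourEqGo dice (List.range' a k) = findVal dice (dice.drop a) := by
  intro k
  induction k with
  | zero =>
    intro a ha
    have hd : dice.drop a = [] := List.drop_eq_nil_of_le (by omega)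
    simp [fourEqGo, findVal, hd]
  | succ n ih =>
    intro a ha
    have hlt : a < dice.length := by omega
    rw [List.range'_succ, drop_cons_of_lt dice a hlt]
    show (if fourEqCnt dice a = 3 then dice.getD a 0 * 3 else fourEqGo dice (List.range' (a + 1) n))
        = (if dice.count (dice.getD a 0) = 4 then dice.getD a 0 * 3 else findVal dice (dice.drop (a + 1)))
    rw [cnt_eq dice a hlt, ih (a + 1) (by omega)]
    have hiff : ((dice.count (dice.getD a 0) : Int) - 1 = 3) ↔ dice.count (dice.getD a 0) = 4 := by omega
    by_cases hc : dice.count (dice.getD a 0) = 4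
    · rw [if_pos (hiff.mpr hc), if_pos hc]
    · rw [if_neg (fun hh => hc (hiff.mp hh)), if_neg hc]

lemma scan_map (dice : List Int) (l : List Int) :
    fourEqScan (l.map (fun k => (k, (dice.count k : Int)))) = findVal dice l := by
  induction l with
  | nil => rfl
  | cons x t ih =>
    show (if (dice.count x : Int) = 4 then x * 3 else fourEqScan (t.map (fun k => (k, (dice.count k : Int)))))
        = (if dice.count x = 4 then x * 3 else findVal dice t)
    rw [ih]
    have hiff : ((dice.count x : Int) = 4) ↔ dice.count x = 4 := by omega
    by_cases hc : dice.count x = 4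
    · rw [if_pos (hiff.mpr hc), if_pos hc]
    · rw [if_neg (fun hh => hc (hiff.mp hh)), if_neg hc]

lemma findVal_eq_find? (dice l : List Int) :
    findVal dice l = (match l.find? (fun x => decide (dice.count x = 4)) with
      | some x => x * 3 | none => 0) := by
  induction l with
  | nil => rfl
  | cons x t ih =>
    simp only [findVal, List.find?]
    by_cases hc : dice.count x = 4 <;> simp [hc, ih]

lemma find?_foldl_add (p : Int → Bool) :
    ∀ (xs s : List Int), (xs.foldl PySem.Set.add s).find? p = (s.find? p).or (xs.find? p) := by
  intro xs
  induction xs with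
  | nil => intro s; simp
  | cons x t ih =>
    intro s
    simp only [List.foldl_cons, ih]
    by_cases hmem : x ∈ s
    · have hadd : PySem.Set.add s x = s := by simp [PySem.Set.add, hmem]
      rw [hadd]
      cases hfs : s.find? p with
      | some y => simp [Option.or]
      | none =>
        have hnpx : p x = false := by
          have := List.find?_eq_none.mp hfs x hmem
          simpa using this
        simp [Option.or, List.find?, hnpx]
    · have hadd : PySem.Set.add s x = s ++ [x] := by simp [PySem.Set.add, hmem]
      rw [hadd]
      cases hfs : s.find? p with
      | some y => simp [List.find?_append, hfs, Option.or]
      | none =>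
        simp only [List.find?_append, hfs, Option.none_or]
        cases hpx : p x <;> simp [List.find?, hpx]

lemma findVal_ofList (dice xs : List Int) :
    findVal dice (PySem.Set.ofList xs) = findVal dice xs := by
  rw [findVal_eq_find?, findVal_eq_find?]
  rw [PySem.Set.ofList_eq_foldl, find?_foldl_add]
  simp

-- ===== VERDICT (by name: the statement is the Claim_ definition above) =====
theorem four_eq_spec : Claim_equal_four_eq := by
  intro dice _
  unfold Spec_four_eq four_eq four_eq_alt
  rw [PySem.Dict.foldl_insert_getD_add_one_eq_counter, PySem.Dict.items_counter]
  rw [scan_map, findVal_ofList]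
  rw [List.range_eq_range']
  rw [go_eq dice dice.length 0 (by omega)]
  simp
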